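-- pv_equiv track=rewrite | github.com/nandangrover/2020-Google-Code-Jam | Qualification/ParentingProblem/Test2.py | ParentingProblemSolve
-- ===== SOURCE A (Python) =====
-- def ParentingProblemSolve(arr, size):
--     outputString = ''
--     cameron = ''
--     jamie = ''
--     for i in range(size):
--         subStr = ''
--         for j in range(arr[i][0], arr[i][1]+1):
--             subStr += ',' + str(j) + ','
--         lowLimit = (arr[i][0])
--         upLimit = (arr[i][1])
--         if((int(lowLimit) > 1440 or int(upLimit) > 1440) or int(lowLimit) > int(upLimit)):
--              outputString = 'IMPOSSIBLE'
--              break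
--         if (checkIfNumberNotInRanges(lowLimit,upLimit, cameron)):
--             outputString += 'J'
--             cameron += subStr
--         elif (checkIfNumberNotInRanges(lowLimit,upLimit, jamie)):
--             outputString += 'C'
--             jamie += subStr
--         else:
--             outputString = 'IMPOSSIBLE'
--             break
--     return '%s' % (outputString)
--
-- def checkIfNumberNotInRanges(low, up, string):
--     for i in range(low+1,up):
--             if (',' + str(i) + ',' in string):
--                 return False
--     return True
-- ===== SOURCE B (Python) =====
-- def ParentingProblemSolve(arr, size):
--     letters = []
--     cam, jam = [], []
--     for row in arr[:max(size, 0)]: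
--         lo, up = row[0], row[1]
--         if lo > 1440 or up > 1440 or lo > up:
--             return 'IMPOSSIBLE'
--         if all(max(lo + 1, a) > min(up - 1, b) for a, b in cam):
--             letters.append('J')
--             cam.append((lo, up))
--         elif all(max(lo + 1, a) > min(up - 1, b) for a, b in jam):
--             letters.append('C')
--             jam.append((lo, up))
--         else:
--             return 'IMPOSSIBLE'
--     return ''.join(letters)
-- ===== Notes on version B (the rewrite author's own statement) =====
-- stated objective: alternative
-- what changed: B keeps the input-order greedy assignment but stores each person's bookings as a list of (start,end) interval pairs checked with one max/min comparison per interval, instead of A's comma-delimited string of every booked minute that is rebuilt token by token and scanned with a substring search for each minute of each new activity; …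
-- outside the precondition, e.g. on ParentingProblemSolve([[5, 3], [1]], 2): A returns 'IMPOSSIBLE', B returns 'IMPOSSIBLE'; on ParentingProblemSolve([[2, 1]], 3): A returns 'IMPOSSIBLE', B returns 'IMPOSSIBLE'
import Mathlib
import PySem

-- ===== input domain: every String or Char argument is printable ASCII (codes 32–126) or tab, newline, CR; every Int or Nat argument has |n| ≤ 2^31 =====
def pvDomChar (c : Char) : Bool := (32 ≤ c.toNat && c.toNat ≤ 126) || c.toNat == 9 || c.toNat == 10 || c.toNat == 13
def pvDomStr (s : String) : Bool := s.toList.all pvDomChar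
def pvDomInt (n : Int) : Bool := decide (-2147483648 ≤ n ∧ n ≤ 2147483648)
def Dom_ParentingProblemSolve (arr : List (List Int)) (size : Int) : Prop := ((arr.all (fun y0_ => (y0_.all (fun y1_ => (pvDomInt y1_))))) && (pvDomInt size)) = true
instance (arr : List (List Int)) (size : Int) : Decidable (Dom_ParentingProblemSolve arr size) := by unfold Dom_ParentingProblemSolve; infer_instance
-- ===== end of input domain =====

-- B keeps A's greedy assignment loop but stores each person's bookings as a list of
-- (start, end) interval pairs tested arithmetically, instead of A's string of ','-separated
-- minute tokens scanned by substring search (objective: alternative data structure).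

-- ===== PORT A =====
-- checkIfNumberNotInRanges(low, up, string)
def pvChkA (low up : Int) (s : String) : Bool :=
  (PySem.List.pyRange (low + 1) up 1).all
    (fun i => !(PySem.Str.isIn ("," ++ PySem.Int.toStr i ++ ",") s))

-- the inner loop building subStr for activity [lo, up]
def pvSubA (lo up : Int) : String :=
  (PySem.List.pyRange lo (up + 1) 1).foldl
    (fun s j => s ++ "," ++ PySem.Int.toStr j ++ ",") ""

-- the main 'for i in range(size)' loop with its two break sites
def pvLoopA (arr : List (List Int)) : List Int → String → String → String → String
  | [], out, _, _ => out
  | i :: rest, out, cameron, jamie =>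
    let row := PySem.List.pyGetD arr i []
    let lowLimit := PySem.List.pyGetD row 0 0
    let upLimit := PySem.List.pyGetD row 1 0
    let subStr := pvSubA lowLimit upLimit
    if lowLimit > 1440 || upLimit > 1440 || lowLimit > upLimit then "IMPOSSIBLE"
    else if pvChkA lowLimit upLimit cameron then
      pvLoopA arr rest (out ++ "J") (cameron ++ subStr) jamie
    else if pvChkA lowLimit upLimit jamie then
      pvLoopA arr rest (out ++ "C") cameron (jamie ++ subStr)
    else "IMPOSSIBLE"

def ParentingProblemSolve (arr : List (List Int)) (size : Int) : String :=
  pvLoopA arr (PySem.List.pyRange 0 size 1) "" "" ""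

-- ===== PORT B =====
-- all(max(lo+1, a) > min(up-1, b) for a, b in slots)
def pvFreeB (slots : List (Int × Int)) (lo up : Int) : Bool :=
  slots.all (fun ab => decide (max (lo + 1) ab.1 > min (up - 1) ab.2))

-- the 'for row in arr[:max(size, 0)]' loop with its early returns
def pvLoopB : List (List Int) → List String → List (Int × Int) → List (Int × Int) → String
  | [], letters, _, _ => PySem.Str.join "" letters
  | row :: rows, letters, cam, jam =>
    let lo := PySem.List.pyGetD row 0 0
    let up := PySem.List.pyGetD row 1 0
    if lo > 1440 || up > 1440 || lo > up then "IMPOSSIBLE"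
    else if pvFreeB cam lo up then pvLoopB rows (letters ++ ["J"]) (cam ++ [(lo, up)]) jam
    else if pvFreeB jam lo up then pvLoopB rows (letters ++ ["C"]) cam (jam ++ [(lo, up)])
    else "IMPOSSIBLE"

def ParentingProblemSolve_alt (arr : List (List Int)) (size : Int) : String :=
  pvLoopB (PySem.List.slice arr none (some (max size 0))) [] [] []

-- ===== PRECONDITION & SPEC =====
-- A raises IndexError when range(size) reaches an index past the end of arr or a row with fewer
-- than two entries; Pre_ excludes all such inputs wholesale, which also drops the inputs where an
-- early IMPOSSIBLE break happens to stop A before the malformed index is reached (there A still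
-- returns 'IMPOSSIBLE', and B returns 'IMPOSSIBLE' too).
def Pre_ParentingProblemSolve (arr : List (List Int)) (size : Int) : Prop :=
  size.toNat ≤ arr.length ∧ ∀ row ∈ arr.take size.toNat, 2 ≤ row.length
instance (arr : List (List Int)) (size : Int) : Decidable (Pre_ParentingProblemSolve arr size) := by
  unfold Pre_ParentingProblemSolve; infer_instance

def pvWitness_ParentingProblemSolve : List (List Int) × Int := ([[0, 2], [1, 3], [2, 4]], 3)

def Spec_ParentingProblemSolve (arr : List (List Int)) (size : Int) (out : String) : Prop :=
  out = ParentingProblemSolve_alt arr size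
instance (arr : List (List Int)) (size : Int) (out : String) :
    Decidable (Spec_ParentingProblemSolve arr size out) := by
  unfold Spec_ParentingProblemSolve; infer_instance

-- ===== CLAIM (what is proved, stated in full; the proofs are below) =====
def Claim_equal_ParentingProblemSolve : Prop := ∀ (arr : List (List Int)) (size : Int), Dom_ParentingProblemSolve arr size → Pre_ParentingProblemSolve arr size → Spec_ParentingProblemSolve arr size (ParentingProblemSolve arr size)

-- ===== LEMMAS AND PROOFS =====

-- the ','-delimited token A stores for minute i, as a character list
def pvTok (i : Int) : List Char := ',' :: PySem.Int.toChars i ++ [',']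

-- the character list A's person-string holds after booking the minutes in L
def pvEnc (L : List Int) : List Char := (L.map pvTok).flatten

-- the minutes covered by a list of booked intervals
def pvMins (ps : List (Int × Int)) : List Int :=
  ps.flatMap (fun p => PySem.List.pyRange p.1 (p.2 + 1) 1)

-- A's loop re-expressed over the fetched rows (proof device)
def pvSpecA : List (List Int) → String → String → String → String
  | [], out, _, _ => out
  | row :: rows, out, cameron, jamie =>
    let lowLimit := PySem.List.pyGetD row 0 0
    let upLimit := PySem.List.pyGetD row 1 0
    let subStr := pvSubA lowLimit upLimit
    if lowLimit > 1440 || upLimit > 1440 || lowLimit > upLimit then "IMPOSSIBLE"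
    else if pvChkA lowLimit upLimit cameron then
      pvSpecA rows (out ++ "J") (cameron ++ subStr) jamie
    else if pvChkA lowLimit upLimit jamie then
      pvSpecA rows (out ++ "C") cameron (jamie ++ subStr)
    else "IMPOSSIBLE"

lemma pvDigitChar_inj {a b : ℕ} (ha : a < 10) (hb : b < 10)
    (h : Nat.digitChar a = Nat.digitChar b) : a = b := by
  interval_cases a <;> interval_cases b <;> simp_all [Nat.digitChar]

lemma pvToDigits_inj (n m : ℕ) (h : Nat.toDigits 10 n = Nat.toDigits 10 m) : n = m := by
  induction n using Nat.strong_induction_on generalizing m with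
  | _ n ih =>
    rw [Nat.toDigits_eq_if (n := m) (by norm_num), Nat.toDigits_eq_if (n := n) (by norm_num)] at h
    by_cases hn : n < 10 <;> by_cases hm : m < 10
    · rw [if_pos hn, if_pos hm] at h
      exact pvDigitChar_inj hn hm (List.singleton_injective h)
    · rw [if_pos hn, if_neg hm] at h
      have hl := congrArg List.length h
      have hp := @Nat.length_toDigits_pos 10 (m / 10)
      simp only [List.length_cons, List.length_append, List.length_nil] at hl
      omega
    · rw [if_neg hn, if_pos hm] at h
      have hl := congrArg List.length h
      have hp := @Nat.length_toDigits_pos 10 (n / 10)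
      simp only [List.length_cons, List.length_append, List.length_nil] at hl
      omega
    · rw [if_neg hn, if_neg hm] at h
      have h1 : Nat.toDigits 10 (n / 10) = Nat.toDigits 10 (m / 10) := by
        have := congrArg List.dropLast h
        simpa using this
      have h2 : (n % 10).digitChar = (m % 10).digitChar := by
        have := congrArg List.getLast? h
        simpa using this
      have hdiv : n / 10 = m / 10 := ih (n / 10) (by omega) _ h1
      have hmod : n % 10 = m % 10 :=
        pvDigitChar_inj (Nat.mod_lt _ (by norm_num)) (Nat.mod_lt _ (by norm_num)) h2
      omega

lemma pvToChars_ne_nil (i : Int) : PySem.Int.toChars i ≠ [] := by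
  have h1 := @Nat.length_toDigits_pos 10 i.natAbs
  have h2 := @Nat.length_toDigits_pos 10 i.toNat
  unfold PySem.Int.toChars
  split <;> intro h <;> simp_all

lemma pvComma_not_mem_toChars (i : Int) : ',' ∉ PySem.Int.toChars i := by
  unfold PySem.Int.toChars
  have h : ∀ m : ℕ, ',' ∉ Nat.toDigits 10 m := by
    intro m hmem
    have := Nat.isDigit_of_mem_toDigits (by norm_num) (by norm_num) hmem
    simp [Char.isDigit] at this
  split
  · intro hmem
    rcases List.mem_cons.mp hmem with h' | h'
    · exact absurd h' (by decide)
    · exact h _ h'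
  · exact h _

lemma pvToChars_inj {i j : Int} (h : PySem.Int.toChars i = PySem.Int.toChars j) : i = j := by
  unfold PySem.Int.toChars at h
  by_cases hi : i < 0 <;> by_cases hj : j < 0 <;> simp [hi, hj] at h
  · have := pvToDigits_inj _ _ h; omega
  · have : '-' ∈ Nat.toDigits 10 j.toNat := by rw [← h]; exact List.mem_cons_self
    have := Nat.isDigit_of_mem_toDigits (b := 10) (by norm_num) (by norm_num) this
    simp [Char.isDigit] at this
  · have : '-' ∈ Nat.toDigits 10 i.toNat := by rw [h]; exact List.mem_cons_self
    have := Nat.isDigit_of_mem_toDigits (b := 10) (by norm_num) (by norm_num) this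
    simp [Char.isDigit] at this
  · have := pvToDigits_inj _ _ h; omega

-- a comma-terminated comma-free word read off at the start of 'd ++ "," ++ S' must be d
lemma pvPrefix_eq {w d : List Char} (S : List Char) (hw : ',' ∉ w) (hd : ',' ∉ d)
    (h : w ++ [','] <+: d ++ [','] ++ S) : w = d := by
  induction d generalizing w with
  | nil =>
    cases w with
    | nil => rfl
    | cons a w' =>
      simp [List.cons_prefix_cons] at h
      simp [h.1] at hw
  | cons c d' ihd =>
    cases w with
    | nil =>
      exfalso
      simp [List.cons_prefix_cons] at h
      simp at hd
      exact hd.1 h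
    | cons a w' =>
      simp only [List.cons_append, List.cons_prefix_cons] at h
      have := ihd (w := w') (by simp_all) (by simp_all) h.2
      simp [h.1, this]

lemma pvEnc_shape (L : List Int) : pvEnc L = [] ∨ ∃ t, pvEnc L = ',' :: t := by
  cases L with
  | nil => left; rfl
  | cons j rest =>
    exact Or.inr ⟨PySem.Int.toChars j ++ [','] ++ pvEnc rest, by simp [pvEnc, pvTok]⟩

lemma pvNot_prefix_enc {w : List Char} (L : List Int) (hne : w ≠ []) (hw : ',' ∉ w) :
    ¬ (w ++ [','] <+: pvEnc L) := by
  intro h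
  rcases pvEnc_shape L with hsh | ⟨t, hsh⟩
  · rw [hsh, List.prefix_nil] at h
    simp at h
  · rw [hsh] at h
    cases w with
    | nil => exact hne rfl
    | cons a w' =>
      simp [List.cons_prefix_cons] at h
      simp [h.1] at hw

-- core characterisation: a token pattern occurs in the encoding iff its word is a stored word
lemma pvInfix_enc (L : List Int) (w : List Char) (hne : w ≠ []) (hw : ',' ∉ w) :
    ((',' :: w ++ [',']) <:+: pvEnc L) ↔ ∃ j ∈ L, PySem.Int.toChars j = w := by
  induction L with
  | nil => simp [pvEnc, List.infix_nil]
  | cons j rest ihL =>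
    have hstep : ∀ d : List Char, ',' ∉ d →
        ((',' :: w ++ [',']) <:+: d ++ [','] ++ pvEnc rest ↔
          (',' :: w ++ [',']) <:+: pvEnc rest) := by
      intro d hd
      induction d with
      | nil =>
        simp only [List.nil_append, List.singleton_append, List.infix_cons_iff]
        constructor
        · rintro (hpre | hinf)
          · exfalso
            simp only [List.cons_append, List.cons_prefix_cons] at hpre
            exact pvNot_prefix_enc rest hne hw hpre.2
          · exact hinf
        · exact Or.inr
      | cons c d' ihd =>
        have hc : c ≠ ',' := by intro h; simp [h] at hd
        have hd' : ',' ∉ d' := by simp_all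
        simp only [List.cons_append, List.infix_cons_iff]
        constructor
        · rintro (hpre | hinf)
          · exfalso
            simp only [List.cons_prefix_cons] at hpre
            exact hc hpre.1.symm
          · exact (ihd hd').mp hinf
        · intro h; exact Or.inr ((ihd hd').mpr h)
    have henc : pvEnc (j :: rest) = ',' :: (PySem.Int.toChars j ++ [','] ++ pvEnc rest) := by
      simp [pvEnc, pvTok]
    rw [henc]
    rw [List.infix_cons_iff]
    constructor
    · rintro (hpre | hinf)
      · simp only [List.cons_append, List.cons_prefix_cons] at hpre
        have := pvPrefix_eq (pvEnc rest) hw (pvComma_not_mem_toChars j) hpre.2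
        exact ⟨j, by simp, this.symm⟩
      · rcases (hstep _ (pvComma_not_mem_toChars j)).mp hinf |> ihL.mp with ⟨j', hj', hw'⟩
        exact ⟨j', by simp [hj'], hw'⟩
    · rintro ⟨j', hj', hw'⟩
      rcases List.mem_cons.mp hj' with h | h
      · left
        rw [← hw', h]
        exact List.prefix_append _ _
      · right
        exact (hstep _ (pvComma_not_mem_toChars j)).mpr (ihL.mpr ⟨j', h, hw'⟩)

lemma pvTok_infix_iff (L : List Int) (i : Int) : (pvTok i <:+: pvEnc L) ↔ i ∈ L := by
  rw [show pvTok i = ',' :: PySem.Int.toChars i ++ [','] from rfl,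
    pvInfix_enc L _ (pvToChars_ne_nil i) (pvComma_not_mem_toChars i)]
  constructor
  · rintro ⟨j, hj, h⟩; rwa [pvToChars_inj h] at hj
  · intro h; exact ⟨i, h, rfl⟩

lemma pvSubA_toList (lo up : Int) :
    (pvSubA lo up).toList = pvEnc (PySem.List.pyRange lo (up + 1) 1) := by
  unfold pvSubA pvEnc
  generalize PySem.List.pyRange lo (up + 1) 1 = l
  suffices h : ∀ (l : List Int) (s : String),
      (l.foldl (fun s j => s ++ "," ++ PySem.Int.toStr j ++ ",") s).toList
        = s.toList ++ (l.map pvTok).flatten by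
    simpa using h l ""
  intro l
  induction l with
  | nil => simp
  | cons j rest ih =>
    intro s
    simp [ih, String.toList_append, pvTok, PySem.Int.toList_toStr]

lemma pvMem_mins (ps : List (Int × Int)) (i : Int) :
    i ∈ pvMins ps ↔ ∃ p ∈ ps, p.1 ≤ i ∧ i ≤ p.2 := by
  simp only [pvMins, List.mem_flatMap, PySem.List.mem_pyRange_one]
  constructor
  · rintro ⟨p, hp, h1, h2⟩; exact ⟨p, hp, h1, by omega⟩
  · rintro ⟨p, hp, h1, h2⟩; exact ⟨p, hp, h1, by omega⟩

lemma pvChkA_eq_freeB (lo up : Int) (cam : String) (camI : List (Int × Int))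
    (hinv : cam.toList = pvEnc (pvMins camI)) :
    pvChkA lo up cam = pvFreeB camI lo up := by
  rw [Bool.eq_iff_iff]
  unfold pvChkA pvFreeB
  simp only [List.all_eq_true, Bool.not_eq_eq_eq_not, Bool.not_true,
    PySem.List.mem_pyRange_one, decide_eq_true_eq]
  constructor
  · intro h p hp
    by_contra hcon
    rw [not_lt] at hcon
    have hi : (lo + 1 ≤ max (lo + 1) p.1) ∧ (min (up - 1) p.2 < up) := by omega
    have hfalse := h (max (lo + 1) p.1) ⟨by omega, by omega⟩
    rw [PySem.Str.isIn_eq, PySem.Chars.isIn_eq_false_iff] at hfalse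
    apply hfalse
    have : (("," ++ PySem.Int.toStr (max (lo + 1) p.1) ++ ",").toList) = pvTok (max (lo + 1) p.1) := by
      simp [String.toList_append, PySem.Int.toList_toStr, pvTok]
    rw [this, hinv]
    rw [pvTok_infix_iff, pvMem_mins]
    exact ⟨p, hp, by omega, by omega⟩
  · intro h i hi
    rw [PySem.Str.isIn_eq, PySem.Chars.isIn_eq_false_iff]
    intro hinf
    have : (("," ++ PySem.Int.toStr i ++ ",").toList) = pvTok i := by
      simp [String.toList_append, PySem.Int.toList_toStr, pvTok]
    rw [this, hinv, pvTok_infix_iff, pvMem_mins] at hinf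
    rcases hinf with ⟨p, hp, h1, h2⟩
    have := h p hp
    omega

lemma pvMins_append (ps : List (Int × Int)) (lo up : Int) :
    pvMins (ps ++ [(lo, up)]) = pvMins ps ++ PySem.List.pyRange lo (up + 1) 1 := by
  simp [pvMins]

lemma pvJoin_nil_flatten (parts : List (List Char)) :
    PySem.Chars.join [] parts = parts.flatten := by
  induction parts with
  | nil => simp [PySem.Chars.join_nil]
  | cons p rest ih =>
    cases rest with
    | nil => simp [PySem.Chars.join_singleton]
    | cons q r =>
      rw [PySem.Chars.join_cons_cons]
      simp [ih]

lemma pvJoin_empty_toList (letters : List String) :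
    (PySem.Str.join "" letters).toList = (letters.map String.toList).flatten := by
  rw [PySem.Str.toList_join]
  have h0 : ("" : String).toList = [] := rfl
  rw [h0, pvJoin_nil_flatten]

lemma pvJoin_snoc (letters : List String) (x : String) :
    PySem.Str.join "" (letters ++ [x]) = PySem.Str.join "" letters ++ x := by
  apply String.toList_inj.mp
  rw [String.toList_append, pvJoin_empty_toList, pvJoin_empty_toList]
  simp

lemma pvMain (rows : List (List Int)) :
    ∀ (letters : List String) (cam jam : String) (camI jamI : List (Int × Int)),
      cam.toList = pvEnc (pvMins camI) → jam.toList = pvEnc (pvMins jamI) →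
      pvSpecA rows (PySem.Str.join "" letters) cam jam = pvLoopB rows letters camI jamI := by
  induction rows with
  | nil => intros; rfl
  | cons row rest ih =>
    intro letters cam jam camI jamI hc hj
    unfold pvSpecA pvLoopB
    simp only
    set lo := PySem.List.pyGetD row 0 0
    set up := PySem.List.pyGetD row 1 0
    rw [pvChkA_eq_freeB lo up cam camI hc, pvChkA_eq_freeB lo up jam jamI hj]
    split_ifs with hguard h1 h2
    · rfl
    · rw [← pvJoin_snoc]
      have hc' : (cam ++ pvSubA lo up).toList = pvEnc (pvMins (camI ++ [(lo, up)])) := by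
        rw [String.toList_append, pvSubA_toList, hc, pvMins_append]
        simp [pvEnc]
      exact ih (letters ++ ["J"]) (cam ++ pvSubA lo up) jam (camI ++ [(lo, up)]) jamI hc' hj
    · rw [← pvJoin_snoc]
      have hj' : (jam ++ pvSubA lo up).toList = pvEnc (pvMins (jamI ++ [(lo, up)])) := by
        rw [String.toList_append, pvSubA_toList, hj, pvMins_append]
        simp [pvEnc]
      exact ih (letters ++ ["C"]) cam (jam ++ pvSubA lo up) camI (jamI ++ [(lo, up)]) hc hj'
    · rfl

lemma pvLoopA_eq_spec (arr : List (List Int)) :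
    ∀ (idxs : List Int) (out cam jam : String),
      pvLoopA arr idxs out cam jam
        = pvSpecA (idxs.map (fun i => PySem.List.pyGetD arr i [])) out cam jam := by
  intro idxs
  induction idxs with
  | nil => intros; rfl
  | cons i rest ih =>
    intro out cam jam
    unfold pvLoopA pvSpecA
    simp only [List.map_cons]
    split_ifs <;> simp [ih]

lemma pvRange_map_take (arr : List (List Int)) (size : Int)
    (h : size.toNat ≤ arr.length) :
    (PySem.List.pyRange 0 size 1).map (fun i => PySem.List.pyGetD arr i [])
      = arr.take size.toNat := by
  rw [PySem.List.pyRange_one, List.map_map]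
  have hmap : ∀ k : ℕ, ((fun i => PySem.List.pyGetD arr i []) ∘ fun k : ℕ => (0 : Int) + k) k
      = arr.getD k [] := by
    intro k; simp [PySem.List.pyGetD_natCast]
  rw [List.map_congr_left (fun k _ => hmap k)]
  have hsz : (size - 0).toNat = size.toNat := by omega
  rw [hsz]
  apply List.ext_getElem
  · simp [h]
  · intro n h1 h2
    simp at h1 h2 ⊢
    have hn : n < arr.length := by omega
    rw [List.getElem?_eq_getElem hn]
    rfl

-- ===== VERDICT (by name: the statement is the Claim_ definition above) =====
theorem ParentingProblemSolve_spec : Claim_equal_ParentingProblemSolve := by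
  intro arr size _ hpre
  unfold Spec_ParentingProblemSolve ParentingProblemSolve ParentingProblemSolve_alt
  rw [pvLoopA_eq_spec, pvRange_map_take arr size hpre.1]
  rw [PySem.List.slice_to arr (b := max size 0) (le_max_right _ _)]
  have : (max size 0).toNat = size.toNat := by omega
  rw [this]
  have := pvMain (arr.take size.toNat) [] "" "" [] [] (by rfl) (by rfl)
  simpa using this
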